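-- pv_equiv track=rewrite | github.com/CallMeNP/leetcode | 10-regular-expression-matching/recursion.py | prepare_p
-- ===== SOURCE A (Python) =====
-- def prepare_p(p):
--     i = 0
--     while i < len(p) - 1:
--         if p[i] == p[i + 1] == "*":
--             p = p[:i] + p[i + 1:]
--             continue
--         i += 1
--     if len(p) > 0 and p[0] == "*":
--         p = p[1:]
--     return p
-- ===== SOURCE B (Python) =====
-- def prepare_p(p):
--     buf = []
--     for c in p:
--         if c == '*' and (not buf or buf[-1] == '*'):
--             continue
--         buf.append(c)
--     return "".join(buf)
-- ===== Notes on version B (the rewrite author's own statement) =====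
-- stated objective: simpler
-- what changed: Replaces A's in-place index-based deletion loop plus separate leading-star strip with one forward accumulator pass that skips a '*' when the buffer is empty or already ends in '*'.
import Mathlib
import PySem

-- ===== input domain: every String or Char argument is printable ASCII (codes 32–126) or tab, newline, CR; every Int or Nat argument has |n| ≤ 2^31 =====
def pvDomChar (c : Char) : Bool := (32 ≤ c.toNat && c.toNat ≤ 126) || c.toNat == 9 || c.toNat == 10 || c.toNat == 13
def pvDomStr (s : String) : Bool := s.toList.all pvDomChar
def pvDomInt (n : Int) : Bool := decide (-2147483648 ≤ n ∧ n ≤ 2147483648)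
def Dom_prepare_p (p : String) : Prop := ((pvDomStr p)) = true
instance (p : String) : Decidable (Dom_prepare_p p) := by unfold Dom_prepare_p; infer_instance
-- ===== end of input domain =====

-- B replaces A's quadratic in-place deletion loop + separate leading-star strip
-- with a single linear accumulator pass (objective: simpler, one pass).

-- ===== PORT A =====
-- A's while-loop: scan with index i, deleting p[i] whenever p[i] == p[i+1] == '*'.
def prepLoop (p : List Char) (i : Nat) : List Char :=
  if _h : i < p.length - 1 then
    if p.getD i ' ' = '*' ∧ p.getD (i+1) ' ' = '*' then
      prepLoop (p.take i ++ p.drop (i+1)) i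
    else
      prepLoop p (i+1)
  else p
termination_by p.length - i
decreasing_by
  · simp only [List.length_append, List.length_take, List.length_drop]; omega
  · omega

def prepare_p (p : String) : String :=
  let q := prepLoop p.toList 0
  -- `if len(p) > 0 and p[0] == "*": p = p[1:]`
  String.ofList (if q.length > 0 ∧ q.getD 0 ' ' = '*' then q.drop 1 else q)

-- ===== PORT B =====
-- one pass: skip a '*' when the buffer is empty or already ends in '*'
def prepare_p_alt (p : String) : String :=
  String.ofList (p.toList.foldl
    (fun buf c => if c = '*' ∧ (buf = [] ∨ buf.getLast? = some '*') then buf else buf ++ [c]) [])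

-- ===== PRECONDITION & SPEC =====
def Spec_prepare_p (p : String) (out : String) : Prop := out = prepare_p_alt p
instance (p : String) (out : String) : Decidable (Spec_prepare_p p out) := by unfold Spec_prepare_p; infer_instance

-- ===== CLAIM (what is proved, stated in full; the proofs are below) =====
def Claim_equal_prepare_p : Prop := ∀ (p : String), Dom_prepare_p p → Spec_prepare_p p (prepare_p p)

-- ===== LEMMAS AND PROOFS =====

-- canonical form: collapse each run of '*' to a single '*'
def collapse : List Char → List Char
  | [] => []
  | [a] => [a]
  | a :: b :: t => if a = '*' ∧ b = '*' then collapse (b :: t) else a :: collapse (b :: t)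

-- strip one leading '*'
def strip1 (l : List Char) : List Char :=
  if l.head? = some '*' then l.tail else l

-- emission function characterising B's fold; the Bool is "buffer empty or ends in '*'"
def emit : Bool → List Char → List Char
  | _, [] => []
  | s, c :: t => if c = '*' ∧ s = true then emit s t else c :: emit (c == '*') t

theorem collapse_cons_of_ne (c : Char) (u : List Char) (hc : c ≠ '*') :
    collapse (c :: u) = c :: collapse u := by
  cases u with
  | nil => simp [collapse]
  | cons d u' => simp [collapse, hc]

theorem collapse_star_cons (t : List Char) :
    collapse ('*' :: t) = '*' :: strip1 (collapse t) := by
  induction t with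
  | nil => simp [collapse, strip1]
  | cons c u ih =>
    by_cases hc : c = '*'
    · subst hc
      have h2 : collapse ('*' :: '*' :: u) = collapse ('*' :: u) := by simp [collapse]
      rw [h2, ih]
      simp [strip1]
    · rw [show collapse ('*' :: c :: u) = '*' :: collapse (c :: u) by simp [collapse, hc]]
      rw [collapse_cons_of_ne c u hc, strip1]
      simp [hc]

theorem emit_eq (t : List Char) :
    emit false t = collapse t ∧ emit true t = strip1 (collapse t) := by
  induction t with
  | nil => simp [emit, collapse, strip1]
  | cons c u ih =>
    by_cases hc : c = '*'
    · subst hc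
      constructor
      · rw [show emit false ('*' :: u) = '*' :: emit true u by simp [emit]]
        rw [ih.2, collapse_star_cons]
      · rw [show emit true ('*' :: u) = emit true u by simp [emit]]
        rw [ih.2, collapse_star_cons, strip1]
        simp [strip1]
    · have hcb : (c == '*') = false := by simp [hc]
      constructor
      · rw [show emit false (c :: u) = c :: emit (c == '*') u by simp [emit, hc]]
        rw [hcb, ih.1, collapse_cons_of_ne c u hc]
      · rw [show emit true (c :: u) = c :: emit (c == '*') u by simp [emit, hc]]
        rw [hcb, ih.1, collapse_cons_of_ne c u hc, strip1]
        simp [hc]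

-- B's fold emits according to the state "buffer empty or ends in '*'"
theorem foldl_emit (l : List Char) : ∀ buf : List Char,
    l.foldl (fun buf c => if c = '*' ∧ (buf = [] ∨ buf.getLast? = some '*') then buf else buf ++ [c]) buf
      = buf ++ emit (buf.isEmpty || buf.getLast? == some '*') l := by
  induction l with
  | nil => intro buf; simp [emit]
  | cons c t ih =>
    intro buf
    by_cases h : c = '*' ∧ (buf = [] ∨ buf.getLast? = some '*')
    · have hs : (buf.isEmpty || buf.getLast? == some '*') = true := by
        rcases h.2 with h2 | h2 <;> simp [h2]
      simp only [List.foldl_cons, if_pos h, ih buf, hs]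
      rw [show emit true (c :: t) = emit true t by simp [emit, h.1]]
    · have hs2 : ((buf ++ [c]).isEmpty || (buf ++ [c]).getLast? == some '*') = (c == '*') := by
        simp [List.getLast?_append]
      simp only [List.foldl_cons, if_neg h, ih (buf ++ [c]), hs2]
      by_cases hc : c = '*'
      · subst hc
        have hb : ¬ (buf = [] ∨ buf.getLast? = some '*') := fun hb => h ⟨rfl, hb⟩
        have hs : (buf.isEmpty || buf.getLast? == some '*') = false := by
          push Not at hb; simp [hb.1, hb.2]
        rw [hs, show emit false ('*' :: t) = '*' :: emit true t by simp [emit]]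
        simp
      · have : emit (buf.isEmpty || buf.getLast? == some '*') (c :: t)
            = c :: emit (c == '*') t := by
          cases hb : (buf.isEmpty || buf.getLast? == some '*') <;> simp [emit, hc]
        rw [this]
        simp

theorem prepLoop_eq (n : Nat) : ∀ pre post : List Char, post.length ≤ n →
    prepLoop (pre ++ post) pre.length = pre ++ collapse post := by
  induction n with
  | zero =>
    intro pre post hn
    have : post = [] := List.eq_nil_of_length_eq_zero (Nat.le_zero.mp hn)
    subst this
    rw [prepLoop]
    simp [collapse]
  | succ n ih =>
    intro pre post hn
    match post with
    | [] => rw [prepLoop]; simp [collapse]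
    | [a] =>
      rw [prepLoop]
      simp [collapse]
    | a :: b :: t =>
      rw [prepLoop]
      have hlen : pre.length < (pre ++ a :: b :: t).length - 1 := by simp
      have hga : (pre ++ a :: b :: t).getD pre.length ' ' = a := by
        simp [List.getD]
      have hgb : (pre ++ a :: b :: t).getD (pre.length + 1) ' ' = b := by
        have h1 : (pre ++ a :: b :: t)[pre.length + 1]? = (a :: b :: t)[pre.length + 1 - pre.length]? := by
          rw [List.getElem?_append_right (by omega)]
        simp only [List.getD, h1]
        have h2 : pre.length + 1 - pre.length = 1 := by omega
        rw [h2]; rfl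
      rw [dif_pos hlen, hga, hgb]
      by_cases hab : a = '*' ∧ b = '*'
      · rw [if_pos hab]
        have htake : (pre ++ a :: b :: t).take pre.length = pre := by
          simp [List.take_append_of_le_length (Nat.le_refl _)]
        have hdrop : (pre ++ a :: b :: t).drop (pre.length + 1) = b :: t := by
          rw [show pre ++ a :: b :: t = (pre ++ [a]) ++ b :: t by simp]
          rw [show pre.length + 1 = (pre ++ [a]).length by simp]
          simp
        rw [htake, hdrop, ih pre (b :: t) (by simpa using Nat.le_of_succ_le_succ hn)]
        have : collapse (a :: b :: t) = collapse (b :: t) := by simp [collapse, hab.1, hab.2]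
        rw [this]
      · rw [if_neg hab]
        have : pre.length + 1 = (pre ++ [a]).length := by simp
        rw [show pre ++ a :: b :: t = (pre ++ [a]) ++ b :: t by simp, this]
        rw [ih (pre ++ [a]) (b :: t) (by simpa using Nat.le_of_succ_le_succ hn)]
        have hcol : collapse (a :: b :: t) = a :: collapse (b :: t) := by
          simp [collapse, hab]
        simp [hcol]

theorem strip1_as_if (q : List Char) :
    (if q.length > 0 ∧ q.getD 0 ' ' = '*' then q.drop 1 else q) = strip1 q := by
  cases q with
  | nil => simp [strip1]
  | cons c t =>
    by_cases hc : c = '*' <;> simp [strip1, hc, List.getD]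

-- ===== VERDICT (by name: the statement is the Claim_ definition above) =====
theorem prepare_p_spec : Claim_equal_prepare_p := by
  intro p _
  unfold Spec_prepare_p prepare_p prepare_p_alt
  have hA : prepLoop p.toList 0 = collapse p.toList := by
    have := prepLoop_eq p.toList.length [] p.toList (Nat.le_refl _)
    simpa using this
  rw [foldl_emit p.toList []]
  simp only [hA, strip1_as_if]
  have := (emit_eq p.toList).2
  simp [this]
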